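-- pv_equiv track=rewrite | github.com/aashisghimire/Optimal-Protocol | randProtocol.py | trivial_upper_bound
-- ===== SOURCE A (Python) =====
-- def trivial_upper_bound(matrix):
--     """
--     given a matrix, returns the trivial upper bound on the communication complexity based on the size of the matrix(not
--     the actual matrix)
--     """
--     a = min(len(matrix), len(matrix[0]))
--     c = 0
--     result = 0
--     while a != 1:
--         if a & 1 == 1:
--             c += 1
--         result += 1
--         a = a >> 1
--     if c == 0:
--         return result + 1
--     else:
--         return result + 2
-- ===== SOURCE B (Python) =====
-- def trivial_upper_bound(matrix):
--     """
--     given a matrix, returns the trivial upper bound on the communication complexity based on the size of the matrix(not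
--     the actual matrix)
--     """
--     a = min(len(matrix), len(matrix[0]))
--     return a.bit_length() + (0 if a & (a - 1) == 0 else 1)
-- ===== Notes on version B (the rewrite author's own statement) =====
-- stated objective: simpler
-- what changed: Replaced the bit-by-bit shifting loop that counts shifts and odd bits with a closed-form expression: a.bit_length() plus a power-of-two test a & (a-1) == 0.
import Mathlib
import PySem

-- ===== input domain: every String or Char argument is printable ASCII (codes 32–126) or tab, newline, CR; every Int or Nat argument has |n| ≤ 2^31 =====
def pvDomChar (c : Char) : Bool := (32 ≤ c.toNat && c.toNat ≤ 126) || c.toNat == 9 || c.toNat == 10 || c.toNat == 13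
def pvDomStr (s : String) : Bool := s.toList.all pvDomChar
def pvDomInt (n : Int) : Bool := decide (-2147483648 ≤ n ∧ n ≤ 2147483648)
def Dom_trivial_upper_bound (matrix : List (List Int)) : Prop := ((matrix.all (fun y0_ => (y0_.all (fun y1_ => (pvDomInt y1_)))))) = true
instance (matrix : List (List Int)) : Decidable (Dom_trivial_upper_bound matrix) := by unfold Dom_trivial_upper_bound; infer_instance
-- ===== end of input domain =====

-- B replaces A's bit-by-bit shifting loop with a closed form: bit_length plus a
-- power-of-two test (objective: simpler).

-- ===== PORT A =====
-- the 'while a != 1' loop; the 'a = 0' branch is a totality guard only: Python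
-- loops forever there, and Pre_ excludes it
def tubLoop (a c result : Nat) : Int :=
  if a = 1 then (if c = 0 then (result : Int) + 1 else (result : Int) + 2)
  else if a = 0 then 0
  else tubLoop (a >>> 1) (if a &&& 1 = 1 then c + 1 else c) (result + 1)
decreasing_by
  simp only [Nat.shiftRight_one]
  omega

def trivial_upper_bound (matrix : List (List Int)) : Int :=
  match PySem.List.pyGet? matrix 0 with
  | none => 0   -- matrix[0] raises IndexError; excluded by Pre_
  | some row => tubLoop (min matrix.length row.length) 0 0

-- ===== PORT B =====
-- int.bit_length() ported exactly: 0 for 0, otherwise log2 a + 1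
def tubBitLength (a : Nat) : Nat := if a = 0 then 0 else Nat.log2 a + 1

def trivial_upper_bound_alt (matrix : List (List Int)) : Int :=
  match PySem.List.pyGet? matrix 0 with
  | none => 0   -- matrix[0] raises IndexError; excluded by Pre_
  | some row =>
    let a := min matrix.length row.length
    (tubBitLength a : Int) + (if a &&& (a - 1) = 0 then 0 else 1)

-- ===== PRECONDITION & SPEC =====
-- Pre_ excludes only inputs on which A returns no value: the empty matrix
-- (matrix[0] raises IndexError) and an empty first row (a = 0, so A's
-- 'while a != 1' loop never terminates).
def Pre_trivial_upper_bound (matrix : List (List Int)) : Prop :=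
  matrix ≠ [] ∧ matrix.headD [] ≠ []
instance (matrix : List (List Int)) : Decidable (Pre_trivial_upper_bound matrix) := by
  unfold Pre_trivial_upper_bound; infer_instance

def pvWitness_trivial_upper_bound : List (List Int) := [[1, 2], [3, 4]]

def Spec_trivial_upper_bound (matrix : List (List Int)) (out : Int) : Prop := out = trivial_upper_bound_alt matrix
instance (matrix : List (List Int)) (out : Int) : Decidable (Spec_trivial_upper_bound matrix out) := by unfold Spec_trivial_upper_bound; infer_instance

-- ===== CLAIM (what is proved, stated in full; the proofs are below) =====
def Claim_equal_trivial_upper_bound : Prop := ∀ (matrix : List (List Int)), Dom_trivial_upper_bound matrix → Pre_trivial_upper_bound matrix → Spec_trivial_upper_bound matrix (trivial_upper_bound matrix)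

-- ===== LEMMAS AND PROOFS =====

-- step facts for the power-of-two test a &&& (a-1) = 0
lemma land_pred_odd (b : Nat) : (2 * b + 1) &&& (2 * b) = 2 * b := by
  have h := Nat.land_bit true b false b
  simpa [Nat.bit, Bool.and_self] using h

lemma land_pred_even (b : Nat) (hb : 1 ≤ b) :
    (2 * b) &&& (2 * b - 1) = 2 * (b &&& (b - 1)) := by
  have h := Nat.land_bit false b true (b - 1)
  have hb' : 2 * (b - 1) + 1 = 2 * b - 1 := by omega
  simpa [Nat.bit, hb'] using h

-- the loop's value in closed form
lemma tubLoop_eq (a : Nat) (ha : 1 ≤ a) : ∀ (c result : Nat),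
    tubLoop a c result =
      (result : Int) + (Nat.log2 a : Int) +
        (if c = 0 ∧ a &&& (a - 1) = 0 then 1 else 2) := by
  induction a using Nat.strong_induction_on with
  | _ a ih =>
    intro c result
    rcases eq_or_lt_of_le ha with h1 | h2
    · -- a = 1
      subst h1
      rw [tubLoop]
      have hl : Nat.log2 1 = 0 := by rw [Nat.log2_def]; norm_num
      rw [if_pos rfl, hl]
      have hc : (c = 0 ∧ (1 : Nat) &&& (1 - 1) = 0) ↔ c = 0 :=
        ⟨And.left, fun h => ⟨h, by decide⟩⟩
      simp only [hc]
      split_ifs <;> push_cast <;> omega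
    · -- a ≥ 2
      have ha0 : a ≠ 0 := by omega
      have ha1 : a ≠ 1 := by omega
      rw [tubLoop]
      simp only [ha0, ha1, if_false]
      have hdiv : a >>> 1 = a / 2 := Nat.shiftRight_one a
      have hd1 : 1 ≤ a / 2 := by omega
      have hdlt : a / 2 < a := by omega
      rw [hdiv, ih (a / 2) hdlt hd1]
      have hlog : Nat.log2 a = Nat.log2 (a / 2) + 1 := by
        rw [Nat.log2_def, if_pos (show 2 ≤ a by omega)]
      have hand1 : a &&& 1 = a % 2 := Nat.and_one_is_mod a
      rcases Nat.even_or_odd a with he | ho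
      · -- a even
        obtain ⟨b, hb⟩ := he
        have hb' : a = 2 * b := by omega
        have hbpos : 1 ≤ b := by omega
        have hmod : a % 2 = 0 := by omega
        have hpw : a &&& (a - 1) = 2 * (b &&& (b - 1)) := by
          rw [hb']; exact land_pred_even b hbpos
        have hiff : (a &&& (a - 1) = 0) ↔ (b &&& (b - 1) = 0) := by rw [hpw]; omega
        have hhalf : a / 2 = b := by omega
        rw [hand1, hmod, if_neg (by omega : ¬ (0 = 1)), hhalf, hlog, hhalf]
        by_cases hc : c = 0 ∧ b &&& (b - 1) = 0
        · rw [if_pos hc, if_pos ⟨hc.1, hiff.mpr hc.2⟩]; push_cast; ring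
        · rw [if_neg hc, if_neg (fun hh => hc ⟨hh.1, hiff.mp hh.2⟩)]; push_cast; ring
      · -- a odd: a &&& (a-1) = 2b ≠ 0, c becomes c + 1
        obtain ⟨b, hb⟩ := ho
        have hbpos : 1 ≤ b := by omega
        have hmod : a % 2 = 1 := by omega
        have hpw : a &&& (a - 1) = 2 * b := by
          have h2b : 2 * b + 1 - 1 = 2 * b := by omega
          rw [hb, h2b]; exact land_pred_odd b
        have hne : ¬ (a &&& (a - 1) = 0) := by rw [hpw]; omega
        rw [hand1, hmod, if_pos rfl, hlog]
        rw [if_neg (by omega : ¬ (c + 1 = 0 ∧ a / 2 &&& (a / 2 - 1) = 0)),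
            if_neg (fun hh => hne hh.2)]
        push_cast; ring

-- ===== VERDICT (by name: the statement is the Claim_ definition above) =====
theorem trivial_upper_bound_spec : Claim_equal_trivial_upper_bound := by
  intro matrix _ hpre
  unfold Spec_trivial_upper_bound
  obtain ⟨hne, hrow⟩ := hpre
  match matrix with
  | row :: rest =>
    have hrow' : row ≠ [] := by simpa using hrow
    have hlen : 1 ≤ row.length := by
      cases row with
      | nil => exact absurd rfl hrow'
      | cons _ _ => simp
    unfold trivial_upper_bound trivial_upper_bound_alt
    simp only [PySem.List.pyGet?_zero_cons]
    set a := min (row :: rest).length row.length with hadef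
    have ha : 1 ≤ a := by simp [hadef]; omega
    have ha0 : a ≠ 0 := by omega
    rw [tubLoop_eq a ha 0 0]
    unfold tubBitLength
    rw [if_neg ha0]
    by_cases hp : a &&& (a - 1) = 0
    · rw [if_pos ⟨rfl, hp⟩, if_pos hp]; push_cast; ring
    · rw [if_neg (fun hh => hp hh.2), if_neg hp]; push_cast; ring
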